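-- pv_equiv track=rewrite | github.com/leibnewton/codestylechecker | rules/CSC030020.py | checkWhetherHasCodeAfterComment
-- ===== SOURCE A (Python) =====
-- def getMultiCommentEndLno(lines, startLine, linestartLno):
--   '''查找多行注释
--   Args:
--     lines:所有行
--     startLine:/*所在行的/*后的字符串
--     linestartLno:/*所在行的line number
--   Returns:
--             返回离/*最近的*/所在的line number；如果查不到*/，则返回-1
--   '''
--   # 查找离/*最近的*/所在的line number
--   if startLine.find('*/') > -1:
--     return linestartLno
--   i = linestartLno + 1
--   while i < len(lines):
--     if lines[i].find('*/') > -1: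
--       return i
--     i = i + 1
--   # 如果查不到*/，则返回-1，说明文件有问题，不要再check该文件了
--   return -1
--
-- def checkWhetherHasCodeAfterComment(lines, startLine, linestartLno):
--   '''check 注释后是否有代码
--   Args:
--     lines:所有行
--     startLine:/*所在行的/*后的字符串
--     linestartLno:/*所在行的line number
--   Returns:
--             是否有代码(True:yes,False:no),注释结束的
--   '''
--   hasCode = False
--   commentEndLno = -1
--   commentEndLno = getMultiCommentEndLno(lines, startLine[2:], linestartLno)
--   if commentEndLno == -1:
--     return False, -1
--   # /*对应的*/不在本行时,说明/*是该行最后一个注释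
--   if commentEndLno > linestartLno:
--     return False, commentEndLno
--   # /*对应的*/不在本行时
--   endIndex = startLine[2:].find('*/')
--   if endIndex == -1:
--     return False, -1
--   endIndex = endIndex + 4
--   tempLine = startLine[endIndex:].strip()
--   # */后为空白(or换行符or//),说明/**/后没有代码
--   if (not tempLine) or tempLine == '\\' or tempLine.startswith('//'):
--     return False, linestartLno
--   if tempLine.startswith('/*'):
--     hasCode, commentEndLno = checkWhetherHasCodeAfterComment(lines, tempLine, linestartLno)
--     return hasCode,commentEndLno
--   else:
--     return True, linestartLno
-- ===== SOURCE B (Python) =====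
-- def checkWhetherHasCodeAfterComment(lines, startLine, linestartLno):
--   '''Flat rewrite: the helper is inlined away.  Peel "/*...*/" groups off the line
--   in a loop over the text after "/*"; only when the line never closes its comment
--   scan the following lines once for "*/".'''
--   s = startLine[2:]
--   while True:
--     j = s.find('*/')
--     if j == -1:
--       for i in range(linestartLno + 1, len(lines)):
--         if '*/' in lines[i]:
--           return False, i
--       return False, -1
--     t = s[j + 2:].strip()
--     if t.startswith('/*'):
--       s = t[2:]
--       continue
--     if not t or t == '\\' or t.startswith('//'):
--       return False, linestartLno
--     return True, linestartLno
-- ===== Notes on version B (the rewrite author's own statement) =====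
-- stated objective: simpler
-- what changed: The getMultiCommentEndLno helper and A's tail recursion are gone: B is one flat loop that peels '/*...*/' groups off the text after the leading '/*' (finding '*/' once per group, where A's helper plus its endIndex recomputation searches each group twice), and only falls back to a single for-scan of the following lines when the line never closes its comment.
-- outside the precondition, e.g. on checkWhetherHasCodeAfterComment(['x'], '/*a*/ b', -1): A returns (False, -1), B returns (True, -1); on checkWhetherHasCodeAfterComment([], '/*a*/', -5): A returns (False, -5), B returns (False, -5)
import Mathlib
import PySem

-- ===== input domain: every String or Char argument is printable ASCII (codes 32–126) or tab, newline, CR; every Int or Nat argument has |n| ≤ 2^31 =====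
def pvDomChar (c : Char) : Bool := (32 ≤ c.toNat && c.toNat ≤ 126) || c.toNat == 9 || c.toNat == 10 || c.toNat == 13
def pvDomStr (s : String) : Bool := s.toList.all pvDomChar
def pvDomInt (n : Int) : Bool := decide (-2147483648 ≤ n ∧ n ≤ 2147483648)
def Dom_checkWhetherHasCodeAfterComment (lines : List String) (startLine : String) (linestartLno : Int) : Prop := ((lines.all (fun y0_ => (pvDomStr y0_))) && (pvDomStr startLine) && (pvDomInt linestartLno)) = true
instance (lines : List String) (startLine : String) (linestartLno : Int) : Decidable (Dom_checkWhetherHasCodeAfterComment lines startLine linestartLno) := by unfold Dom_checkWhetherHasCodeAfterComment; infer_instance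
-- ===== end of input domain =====

-- B inlines the getMultiCommentEndLno helper away: one flat loop peels '/*…*/' groups off the
-- line, and only when the line never closes its comment does B scan the following lines once;
-- objective: simpler. Return values only; neither version mutates its arguments.

-- ===== PORT A =====

-- the 'while i < len(lines)' scan inside getMultiCommentEndLno; 'none' from pyGet? is Python's
-- IndexError (excluded by Pre_), marked here by the sentinel -1
def pvScanA (lines : List String) (i : Int) : Int :=
  if _h : i < (lines.length : Int) then
    match PySem.List.pyGet? lines i with
    | none => -1
    | some s => if PySem.Str.find s "*/" > -1 then i else pvScanA lines (i + 1)
  else -1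
termination_by ((lines.length : Int) - i).toNat
decreasing_by simp_all

-- A's module helper
def getMultiCommentEndLno (lines : List String) (startLine : String) (linestartLno : Int) : Int :=
  if PySem.Str.find startLine "*/" > -1 then linestartLno
  else pvScanA lines (linestartLno + 1)

-- A's recursion, with fuel: each recursive call consumes at least 4 characters of startLine,
-- so fuel = len(startLine) + 1 is never exhausted
def pvGoA (lines : List String) : Nat → String → Int → Bool × Int
  | 0, _, _ => (false, -1)
  | fuel + 1, startLine, linestartLno =>
    let commentEndLno := getMultiCommentEndLno lines (PySem.Str.slice startLine (some 2) none) linestartLno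
    if commentEndLno = -1 then (false, -1)
    else if commentEndLno > linestartLno then (false, commentEndLno)
    else
      let endIndex := PySem.Str.find (PySem.Str.slice startLine (some 2) none) "*/"
      if endIndex = -1 then (false, -1)
      else
        let tempLine := PySem.Str.strip (PySem.Str.slice startLine (some (endIndex + 4)) none)
        if tempLine = "" ∨ tempLine = "\\" ∨ PySem.Str.startswith tempLine "//" then (false, linestartLno)
        else if PySem.Str.startswith tempLine "/*" then pvGoA lines fuel tempLine linestartLno
        else (true, linestartLno)

def checkWhetherHasCodeAfterComment (lines : List String) (startLine : String) (linestartLno : Int) : Bool × Int :=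
  pvGoA lines (PySem.Str.len startLine + 1).toNat startLine linestartLno

-- ===== PORT B =====

-- B's fallback for-loop: first line index in range(linestartLno+1, len(lines)) containing '*/'
-- (pyGetD is exact here: under Pre_ every visited index is in range)
def pvScanB (lines : List String) (linestartLno : Int) : Option Int :=
  (PySem.List.pyRange (linestartLno + 1) (lines.length : Int) 1).find?
    (fun i => PySem.Str.isIn "*/" (PySem.List.pyGetD lines i ""))

-- B's 'while True' peeling loop over the text s after the leading '/*'; the loop runs at most
-- once per 4 characters, so fuel = len(startLine) + 1 is never exhausted
def pvPeelB (lines : List String) (linestartLno : Int) : Nat → String → Bool × Int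
  | 0, _ => (false, -1)
  | fuel + 1, s =>
    let j := PySem.Str.find s "*/"
    if j = -1 then
      match pvScanB lines linestartLno with
      | some i => (false, i)
      | none => (false, -1)
    else
      let t := PySem.Str.strip (PySem.Str.slice s (some (j + 2)) none)
      if PySem.Str.startswith t "/*" then
        pvPeelB lines linestartLno fuel (PySem.Str.slice t (some 2) none)
      else if t = "" ∨ t = "\\" ∨ PySem.Str.startswith t "//" then (false, linestartLno)
      else (true, linestartLno)

def checkWhetherHasCodeAfterComment_alt (lines : List String) (startLine : String) (linestartLno : Int) : Bool × Int :=
  pvPeelB lines linestartLno (PySem.Str.len startLine + 1).toNat (PySem.Str.slice startLine (some 2) none)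

-- ===== PRECONDITION & SPEC =====

-- Pre_ excludes (1) linestartLno + 1 < -len(lines): there the helper's line scan starts below
-- index -len(lines) and raises IndexError whenever it is reached (inputs in that range that
-- never reach the scan are excluded with it); and (2) linestartLno = -1 when startLine[2:]
-- contains '*/': there A's not-found sentinel -1 collides with the line number -1 and A
-- abandons the line as if the file were broken, while B analyses it — a corner no caller
-- specifies (line numbers are non-negative in use).
def Pre_checkWhetherHasCodeAfterComment (lines : List String) (startLine : String) (linestartLno : Int) : Prop :=
  -(lines.length : Int) - 1 ≤ linestartLno ∧
    (linestartLno = -1 → PySem.Str.find (PySem.Str.slice startLine (some 2) none) "*/" = -1)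
instance (lines : List String) (startLine : String) (linestartLno : Int) : Decidable (Pre_checkWhetherHasCodeAfterComment lines startLine linestartLno) := by unfold Pre_checkWhetherHasCodeAfterComment; infer_instance

def pvWitness_checkWhetherHasCodeAfterComment : List String × String × Int := (["int x; */ done"], "/* a */ x = 1;", 0)

def Spec_checkWhetherHasCodeAfterComment (lines : List String) (startLine : String) (linestartLno : Int) (out : Bool × Int) : Prop := out = checkWhetherHasCodeAfterComment_alt lines startLine linestartLno
instance (lines : List String) (startLine : String) (linestartLno : Int) (out : Bool × Int) : Decidable (Spec_checkWhetherHasCodeAfterComment lines startLine linestartLno out) := by unfold Spec_checkWhetherHasCodeAfterComment; infer_instance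

-- ===== CLAIM (what is proved, stated in full; the proofs are below) =====
def Claim_equal_checkWhetherHasCodeAfterComment : Prop := ∀ (lines : List String) (startLine : String) (linestartLno : Int), Dom_checkWhetherHasCodeAfterComment lines startLine linestartLno → Pre_checkWhetherHasCodeAfterComment lines startLine linestartLno → Spec_checkWhetherHasCodeAfterComment lines startLine linestartLno (checkWhetherHasCodeAfterComment lines startLine linestartLno)

-- ===== LEMMAS AND PROOFS =====

theorem pvScanA_ge (lines : List String) (i : Int) :
    pvScanA lines i = -1 ∨ i ≤ pvScanA lines i := by
  fun_induction pvScanA with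
  | case1 i h heq => left; rfl
  | case2 i h s heq hfind => right; exact le_refl i
  | case3 i h s heq hfind ih => rcases ih with h1 | h1
                                · left; exact h1
                                · right; omega
  | case4 i h => left; rfl

-- Str-level wrapper of PySem.Chars.neg_one_le_find
theorem str_find_ge (s sub : String) : -1 ≤ PySem.Str.find s sub := by
  rw [PySem.Str.find_eq]
  exact PySem.Chars.neg_one_le_find _ _

-- A's while-scan equals B's for-scan (under the Pre_ bound no index is out of range)
theorem pvScanA_eq_pvScanB (lines : List String) (lno : Int)
    (hlen : -(lines.length : Int) ≤ lno + 1) :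
    pvScanA lines (lno + 1) = (pvScanB lines lno).getD (-1) := by
  unfold pvScanB
  generalize lno + 1 = i at *
  clear lno
  fun_induction pvScanA with
  | case1 i h heq =>
      exfalso
      have : PySem.Raise.InRange lines.length i := ⟨hlen, h⟩
      rw [PySem.List.pyGet?_eq_none_iff] at heq
      exact heq this
  | case2 i h s heq hfind =>
      have hd : PySem.List.pyGetD lines i "" = s := by
        simp [PySem.List.pyGetD, heq]
      have hp : PySem.Str.isIn "*/" s = true := by
        rw [PySem.Str.isIn_iff_infix, ← PySem.Str.find_ne_neg_one_iff]
        omega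
      rw [PySem.List.pyRange_one_cons h,
        List.find?_cons_of_pos (by simp only [hd]; exact hp)]
      rfl
  | case3 i h s heq hfind ih =>
      have hd : PySem.List.pyGetD lines i "" = s := by
        simp [PySem.List.pyGetD, heq]
      have hp : PySem.Str.isIn "*/" s = false := by
        have h1 := str_find_ge s "*/"
        rw [← Bool.not_eq_true, PySem.Str.isIn_iff_infix, ← PySem.Str.find_ne_neg_one_iff]
        omega
      rw [PySem.List.pyRange_one_cons h,
        List.find?_cons_of_neg (by simp only [hd, hp]; exact Bool.false_ne_true)]
      exact ih (by omega)
  | case4 i h =>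
      rw [PySem.List.pyRange_one_eq_nil (by omega)]
      rfl

-- taking s[j+2:] of s = cur[2:] is taking cur from four past the find
theorem pvTailEq (cur : String) (f : Int) (hf : 0 ≤ f) :
    PySem.Str.strip (PySem.Str.slice (PySem.Str.slice cur (some 2) none) (some (f + 2)) none)
      = PySem.Str.strip (PySem.Str.slice cur (some (f + 4)) none) := by
  apply String.toList_inj.mp
  simp only [PySem.Str.toList_strip, PySem.Str.toList_slice, PySem.Chars.slice_eq_listSlice]
  rw [show (f + 2 = ((f.toNat + 2 : Nat) : Int)) by omega,
      show (f + 4 = ((f.toNat + 4 : Nat) : Int)) by omega,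
      show ((2:Int) = ((2:Nat):Int)) by norm_num,
      PySem.List.slice_from_natCast, PySem.List.slice_from_natCast, PySem.List.slice_from_natCast,
      List.drop_drop]
  congr 2
  omega

-- a string starting with '/*' is neither empty nor '\' nor a '//' comment
theorem startswith_slashstar (t : String) (h : PySem.Str.startswith t "/*" = true) :
    ¬ (t = "" ∨ t = "\\" ∨ PySem.Str.startswith t "//" = true) := by
  rw [show PySem.Str.startswith t "/*" = PySem.Chars.startswith t.toList "/*".toList from
        PySem.Str.startswith_eq t "/*",
      PySem.Chars.startswith_iff] at h
  obtain ⟨r, hr⟩ := h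
  rintro (h1 | h1 | h1)
  · rw [h1] at hr; simp at hr
  · rw [h1] at hr; simp at hr
  · rw [show PySem.Str.startswith t "//" = PySem.Chars.startswith t.toList "//".toList from
          PySem.Str.startswith_eq t "//",
        PySem.Chars.startswith_iff] at h1
    obtain ⟨r2, hr2⟩ := h1
    rw [← hr] at hr2
    simp at hr2

-- the main loop correspondence: A's recursion over cur equals B's loop over s = cur[2:]
theorem pvGoA_eq_pvPeelB (lines : List String) (lno : Int)
    (hlen : -(lines.length : Int) - 1 ≤ lno) :
    ∀ (fuel : Nat) (cur : String),
      (lno = -1 → PySem.Str.find (PySem.Str.slice cur (some 2) none) "*/" = -1) →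
      pvGoA lines fuel cur lno = pvPeelB lines lno fuel (PySem.Str.slice cur (some 2) none) := by
  intro fuel
  induction fuel with
  | zero => intro cur _; rfl
  | succ n ih =>
      intro cur hcur
      set s := PySem.Str.slice cur (some 2) none with hs
      by_cases hj : PySem.Str.find s "*/" = -1
      · -- no '*/' on this line: both sides fall to the line scan
        have hngt : ¬ PySem.Str.find s "*/" > -1 := by omega
        have hsc : pvScanA lines (lno + 1) = (pvScanB lines lno).getD (-1) :=
          pvScanA_eq_pvScanB lines lno (by omega)
        simp only [pvGoA, pvPeelB, ← hs, getMultiCommentEndLno, if_neg hngt, if_pos hj]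
        cases hfb : pvScanB lines lno with
        | none =>
            rw [hfb, Option.getD_none] at hsc
            simp [hsc]
        | some k =>
            rw [hfb, Option.getD_some] at hsc
            by_cases hk : k = -1
            · simp [hsc, hk]
            · have hb := pvScanA_ge lines (lno + 1)
              rw [hsc] at hb
              have hgt : lno < k := by omega
              simp [hsc, hk, hgt]
      · -- the comment closes on this line
        have hlno : lno ≠ -1 := fun h => hj (hcur h)
        have hgt : PySem.Str.find s "*/" > -1 := by
          have h1 := str_find_ge s "*/"
          omega
        simp only [pvGoA, pvPeelB, ← hs, getMultiCommentEndLno, if_pos hgt, if_neg hlno,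
          lt_irrefl, if_false, if_neg hj]
        have hteq := pvTailEq cur (PySem.Str.find s "*/") (by omega)
        rw [← hs] at hteq
        rw [← hteq]
        set t := PySem.Str.strip (PySem.Str.slice s (some (PySem.Str.find s "*/" + 2)) none)
        by_cases hst : PySem.Str.startswith t "/*" = true
        · rw [if_neg (startswith_slashstar t hst), if_pos hst, if_pos hst]
          exact ih t (fun h => absurd h hlno)
        · rw [if_neg hst, if_neg hst]

-- ===== VERDICT (by name: the statement is the Claim_ definition above) =====
theorem checkWhetherHasCodeAfterComment_spec : Claim_equal_checkWhetherHasCodeAfterComment := by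
  intro lines startLine linestartLno _hdom hpre
  unfold Spec_checkWhetherHasCodeAfterComment
  unfold checkWhetherHasCodeAfterComment checkWhetherHasCodeAfterComment_alt
  exact pvGoA_eq_pvPeelB lines linestartLno hpre.1 _ startLine hpre.2
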